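-- pv_equiv track=rewrite | github.com/uptuk/thesis-msc | 3_refine_wasabi.py | tx_reuses_output_address
-- ===== SOURCE A (Python) =====
-- def tx_reuses_output_address(tx: dict) -> bool:
--     """
--     Checks if the transaction re-uses the same output address multiple times.
--     :param tx: The transaction to check
--     :return: True if at least one address occurs at least twice
--     """
--     seen = set()
--     for output in tx['outputs']:
--         for address in output['address']:
--             if address in seen:
--                 return True
--             seen.add(address)
--     return False
-- ===== SOURCE B (Python) =====
-- def tx_reuses_output_address(tx: dict) -> bool:
--     """
--     Checks if the transaction re-uses the same output address multiple times.
--     :param tx: The transaction to check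
--     :return: True if at least one address occurs at least twice
--     """
--     addrs = sorted(a for output in tx['outputs'] for a in output['address'])
--     for x, y in zip(addrs, addrs[1:]):
--         if x == y:
--             return True
--     return False
-- ===== Notes on version B (the rewrite author's own statement) =====
-- stated objective: alternative
-- what changed: Replaces the seen-set membership test entirely: B sorts the flattened address list and scans adjacent pairs for an equal neighbour, using no set at all.
-- outside the precondition, e.g. on tx_reuses_output_address({'outputs': [{'address': ['x', 'x']}, {}]}): A returns True, B raises KeyError
import Mathlib
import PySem

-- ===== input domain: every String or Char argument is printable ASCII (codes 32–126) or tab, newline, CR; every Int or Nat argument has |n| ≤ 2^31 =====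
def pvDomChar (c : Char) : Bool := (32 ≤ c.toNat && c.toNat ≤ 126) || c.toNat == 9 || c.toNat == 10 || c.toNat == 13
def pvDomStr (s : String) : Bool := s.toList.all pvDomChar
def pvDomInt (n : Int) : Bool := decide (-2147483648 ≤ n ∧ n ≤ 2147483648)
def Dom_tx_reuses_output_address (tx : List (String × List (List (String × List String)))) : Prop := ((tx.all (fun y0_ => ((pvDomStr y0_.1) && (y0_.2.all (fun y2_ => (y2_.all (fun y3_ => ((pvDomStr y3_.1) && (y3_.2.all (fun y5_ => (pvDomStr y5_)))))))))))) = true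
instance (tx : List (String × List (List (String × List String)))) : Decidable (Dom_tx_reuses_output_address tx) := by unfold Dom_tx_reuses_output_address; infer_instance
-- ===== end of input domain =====

-- B uses no set at all: it sorts the flattened address list and scans adjacent
-- pairs for an equal neighbour, instead of A's incremental seen-set with early return.

-- output['address'] (total form; Pre_ guarantees the key is present)
def pvAddrOf (o : List (String × List String)) : List String :=
  ((PySem.Dict.mk o).get? "address").getD []

-- ===== PORT A =====
-- inner loop: 'for address in output['address']: …' — returns (early-return flag, updated seen)
def pvLoopAddr (addrs : List String) (seen : PySem.Set String) : Bool × PySem.Set String :=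
  match addrs with
  | [] => (false, seen)
  | a :: rest =>
    if PySem.Set.contains seen a then (true, seen)
    else pvLoopAddr rest (PySem.Set.add seen a)

-- outer loop: 'for output in tx['outputs']: …'
def pvLoopOut (outs : List (List (String × List String))) (seen : PySem.Set String) : Bool :=
  match outs with
  | [] => false
  | o :: rest =>
    match pvLoopAddr (pvAddrOf o) seen with
    | (true, _) => true
    | (false, seen') => pvLoopOut rest seen'

def tx_reuses_output_address (tx : List (String × List (List (String × List String)))) : Bool :=
  pvLoopOut (((PySem.Dict.mk tx).get? "outputs").getD []) PySem.Set.empty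

-- ===== PORT B =====
-- 'for x, y in zip(addrs, addrs[1:]): if x == y: return True' over the sorted list
def pvAdjEq (l : List String) : Bool :=
  match l with
  | x :: y :: t => if x == y then true else pvAdjEq (y :: t)
  | _ => false

def tx_reuses_output_address_alt (tx : List (String × List (List (String × List String)))) : Bool :=
  let addrs := PySem.List.sorted
    ((((PySem.Dict.mk tx).get? "outputs").getD []).flatMap
      (fun o => ((PySem.Dict.mk o).get? "address").getD [])) (fun x => x) false
  pvAdjEq addrs

-- ===== PRECONDITION & SPEC =====
-- Pre_ excludes transactions missing the 'outputs' key or with an output missing the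
-- 'address' key: Python A raises KeyError there, except when it early-returns True on a
-- duplicate found before the first malformed output — a corner where B naturally raises.
def Pre_tx_reuses_output_address (tx : List (String × List (List (String × List String)))) : Prop :=
  ((PySem.Dict.mk tx).get? "outputs").isSome = true ∧
  ∀ o ∈ ((PySem.Dict.mk tx).get? "outputs").getD [],
    ((PySem.Dict.mk o).get? "address").isSome = true
instance (tx : List (String × List (List (String × List String)))) : Decidable (Pre_tx_reuses_output_address tx) := by unfold Pre_tx_reuses_output_address; infer_instance

def pvWitness_tx_reuses_output_address : (List (String × List (List (String × List String)))) :=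
  [("outputs", [[("address", ["a", "b"])], [("address", ["b"])]])]

def Spec_tx_reuses_output_address (tx : List (String × List (List (String × List String)))) (out : Bool) : Prop := out = tx_reuses_output_address_alt tx
instance (tx : List (String × List (List (String × List String)))) (out : Bool) : Decidable (Spec_tx_reuses_output_address tx out) := by unfold Spec_tx_reuses_output_address; infer_instance

-- ===== CLAIM (what is proved, stated in full; the proofs are below) =====
def Claim_equal_tx_reuses_output_address : Prop := ∀ (tx : List (String × List (List (String × List String)))), Dom_tx_reuses_output_address tx → Pre_tx_reuses_output_address tx → Spec_tx_reuses_output_address tx (tx_reuses_output_address tx)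

-- ===== LEMMAS AND PROOFS =====

lemma pvConsAux (a : String) (rest : List String) (s : List String) (h : a ∉ s) :
    (rest.Nodup ∧ ∀ b ∈ rest, b ∉ s ++ [a]) ↔ ((a :: rest).Nodup ∧ ∀ b ∈ a :: rest, b ∉ s) := by
  constructor
  · rintro ⟨hnd, hmem⟩
    have haR : a ∉ rest := fun hx => (hmem a hx) (by simp)
    refine ⟨List.nodup_cons.2 ⟨haR, hnd⟩, ?_⟩
    intro b hb
    rcases List.mem_cons.1 hb with rfl | hb
    · exact h
    · intro hbs; exact (hmem b hb) (List.mem_append.2 (Or.inl hbs))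
  · rintro ⟨hnd, hmem⟩
    rcases List.nodup_cons.1 hnd with ⟨haR, hndR⟩
    refine ⟨hndR, ?_⟩
    intro b hb hbmem
    rcases List.mem_append.1 hbmem with hbs | hba
    · exact hmem b (List.mem_cons_of_mem a hb) hbs
    · exact haR ((by simpa using hba : b = a) ▸ hb)

lemma pvLoopAddr_false_iff (addrs : List String) (seen : PySem.Set String) :
    (pvLoopAddr addrs seen).1 = false ↔ (addrs.Nodup ∧ ∀ a ∈ addrs, a ∉ seen) := by
  induction addrs generalizing seen with
  | nil => simp [pvLoopAddr]
  | cons a rest ih =>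
    by_cases h : a ∈ seen
    · have hstep : pvLoopAddr (a :: rest) seen = (true, seen) := by
        conv_lhs => rw [pvLoopAddr]
        rw [if_pos ((PySem.Set.contains_iff seen a).2 h)]
      simp [hstep, h]
    · have hc' : ¬ PySem.Set.contains seen a = true := fun hx => h ((PySem.Set.contains_iff seen a).1 hx)
      have hstep : pvLoopAddr (a :: rest) seen = pvLoopAddr rest (PySem.Set.add seen a) := by
        conv_lhs => rw [pvLoopAddr]
        rw [if_neg hc']
      rw [hstep, ih, PySem.Set.add_of_not_mem h]
      exact pvConsAux a rest seen h

lemma pvLoopAddr_snd (addrs : List String) (seen : PySem.Set String)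
    (h : (pvLoopAddr addrs seen).1 = false) :
    (pvLoopAddr addrs seen).2 = addrs.foldl PySem.Set.add seen := by
  induction addrs generalizing seen with
  | nil => simp [pvLoopAddr]
  | cons a rest ih =>
    by_cases hm : a ∈ seen
    · have hstep : pvLoopAddr (a :: rest) seen = (true, seen) := by
        conv_lhs => rw [pvLoopAddr]
        rw [if_pos ((PySem.Set.contains_iff seen a).2 hm)]
      rw [hstep] at h; simp at h
    · have hc' : ¬ PySem.Set.contains seen a = true := fun hx => hm ((PySem.Set.contains_iff seen a).1 hx)
      have hstep : pvLoopAddr (a :: rest) seen = pvLoopAddr rest (PySem.Set.add seen a) := by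
        conv_lhs => rw [pvLoopAddr]
        rw [if_neg hc']
      rw [hstep] at h ⊢
      simpa using ih (PySem.Set.add seen a) h

lemma mem_foldl_set_add (l : List String) (s : PySem.Set String) (y : String) :
    y ∈ l.foldl PySem.Set.add s ↔ y ∈ s ∨ y ∈ l := by
  induction l generalizing s with
  | nil => simp
  | cons a rest ih =>
    rw [List.foldl_cons, ih]
    simp only [PySem.Set.mem_add, List.mem_cons]
    tauto

lemma pvLoopOut_false_iff (outs : List (List (String × List String))) (seen : PySem.Set String) :
    pvLoopOut outs seen = false ↔
      ((outs.flatMap pvAddrOf).Nodup ∧ ∀ a ∈ outs.flatMap pvAddrOf, a ∉ seen) := by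
  induction outs generalizing seen with
  | nil => simp [pvLoopOut]
  | cons o rest ih =>
    rcases hA : pvLoopAddr (pvAddrOf o) seen with ⟨b, seen'⟩
    cases b with
    | true =>
      have hstep : pvLoopOut (o :: rest) seen = true := by
        simp only [pvLoopOut]; rw [hA]
      have h1 : ¬ ((pvAddrOf o).Nodup ∧ ∀ a ∈ pvAddrOf o, a ∉ seen) := by
        rw [← pvLoopAddr_false_iff]
        simp [hA]
      rw [hstep]
      constructor
      · intro h; simp at h
      · intro h
        exfalso
        apply h1
        rcases h with ⟨hnd, hmem⟩
        rw [List.flatMap_cons, List.nodup_append] at hnd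
        exact ⟨hnd.1, fun a ha => hmem a (by simp [ha])⟩
    | false =>
      have hfst : (pvLoopAddr (pvAddrOf o) seen).1 = false := by simp [hA]
      have hsnd : seen' = (pvAddrOf o).foldl PySem.Set.add seen := by
        have := pvLoopAddr_snd (pvAddrOf o) seen hfst
        simp [hA] at this; exact this
      have h1 := (pvLoopAddr_false_iff (pvAddrOf o) seen).1 hfst
      have hstep : pvLoopOut (o :: rest) seen = pvLoopOut rest seen' := by
        simp only [pvLoopOut]; rw [hA]
      rw [hstep, ih, hsnd]
      constructor
      · rintro ⟨hnd, hmem⟩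
        rw [List.flatMap_cons, List.nodup_append]
        have hdisj : (pvAddrOf o).Disjoint (rest.flatMap pvAddrOf) := by
          intro a ha har
          exact hmem a har ((mem_foldl_set_add _ _ _).2 (Or.inr ha))
        refine ⟨⟨h1.1, hnd, fun a ha b hb heq => hdisj ha (heq ▸ hb)⟩, ?_⟩
        intro a ha
        rcases List.mem_append.1 ha with ha | ha
        · exact h1.2 a ha
        · intro hs; exact hmem a ha ((mem_foldl_set_add _ _ _).2 (Or.inl hs))
      · rintro ⟨hnd, hmem⟩
        rw [List.flatMap_cons, List.nodup_append] at hnd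
        refine ⟨hnd.2.1, ?_⟩
        intro a ha hs
        rcases (mem_foldl_set_add _ _ _).1 hs with hs | hfo
        · exact hmem a (by simp [ha]) hs
        · exact hnd.2.2 a hfo a ha rfl

-- on a ≤-sorted list, no equal adjacent pair ↔ no duplicates at all
lemma pvAdjEq_false_iff_nodup (l : List String) (hs : l.Pairwise (· ≤ ·)) :
    pvAdjEq l = false ↔ l.Nodup := by
  induction l with
  | nil => simp [pvAdjEq]
  | cons a t ih =>
    cases t with
    | nil => simp [pvAdjEq]
    | cons b t' =>
      rcases List.pairwise_cons.1 hs with ⟨hale, hs'⟩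
      by_cases hab : a = b
      · subst hab
        have : pvAdjEq (a :: a :: t') = true := by
          simp [pvAdjEq]
        simp [this]
      · have hstep : pvAdjEq (a :: b :: t') = pvAdjEq (b :: t') := by
          simp [pvAdjEq, hab]
        rw [hstep, ih hs']
        have halt : a ∉ b :: t' := by
          intro hmem
          rcases List.mem_cons.1 hmem with rfl | hmem'
          · exact hab rfl
          · -- a ≤ b, b ≤ a (from pairwise on b :: t'), so a = b; contradiction via strictness
            have hab' : a ≤ b := hale b (by simp)
            have hba : b ≤ a := (List.pairwise_cons.1 hs').1 a hmem'
            exact hab (le_antisymm hab' hba)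
        constructor
        · intro hnd; exact List.nodup_cons.2 ⟨halt, hnd⟩
        · intro hnd; exact (List.nodup_cons.1 hnd).2

-- ===== VERDICT (by name: the statement is the Claim_ definition above) =====
theorem tx_reuses_output_address_spec : Claim_equal_tx_reuses_output_address := by
  intro tx _ _
  unfold Spec_tx_reuses_output_address tx_reuses_output_address tx_reuses_output_address_alt
  simp only [show (fun o => ((PySem.Dict.mk o).get? "address").getD []) = pvAddrOf from rfl]
  set outs := ((PySem.Dict.mk tx).get? "outputs").getD [] with houts
  set L := outs.flatMap pvAddrOf with hL
  have hA : pvLoopOut outs PySem.Set.empty = false ↔ L.Nodup := by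
    rw [pvLoopOut_false_iff]
    simp [PySem.Set.empty, ← hL]
  have hperm : (PySem.List.sorted L (fun x => x) false).Perm L := PySem.List.sorted_perm L _ _
  have hBnd : pvAdjEq (PySem.List.sorted L (fun x => x) false) = false ↔ L.Nodup := by
    rw [pvAdjEq_false_iff_nodup _ (by simpa using PySem.List.sorted_pairwise L (fun x => x))]
    exact hperm.nodup_iff
  cases hres : pvLoopOut outs PySem.Set.empty with
  | false =>
    exact ((hBnd.2 (hA.1 hres)).symm)
  | true =>
    have hnd : ¬ L.Nodup := fun h => by rw [hA.2 h] at hres; simp at hres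
    cases hB : pvAdjEq (PySem.List.sorted L (fun x => x) false) with
    | false => exact absurd (hBnd.1 hB) hnd
    | true => rfl
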